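-- pv_equiv track=rewrite | github.com/a1ienforever/BIS | lb7/TakeGrant.py | de_facto_closure
-- ===== SOURCE A (Python) =====
-- def de_jure_closure(S, O, E):
--     # Создаем копию множества ребер для работы
--     Etg = set(E)
--     changed = True
--
--     # Повторяем, пока добавляются новые ребра
--     while changed:
--         changed = False
--         new_edges = set()
--
--         # Применяем правило take
--         for (x, y, t) in Etg:
--             if t == 't':
--                 for (y2, z, α) in Etg:
--                     if y == y2 and (x, z, α) not in Etg:
--                         new_edges.add((x, z, α))
--
--         # Применяем правило grant
--         for (x, y, g) in Etg:
--             if g == 'g':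
--                 for (y2, z, α) in Etg:
--                     if y == y2 and (x, z, α) not in Etg:
--                         new_edges.add((x, z, α))
--
--         # Обновляем множество ребер, если были добавлены новые
--         if new_edges:
--             Etg.update(new_edges)
--             changed = True
--
--     return Etg
--
-- def de_facto_closure(S, O, E, F):
--     # Определяем правила де-факто
--     defacto_rules = {('w', 'spy'), ('w', 'find'), ('r', 'post'), ('r', 'pass')}
--
--     # Получаем де-юре замыкание
--     Es_de_jure = de_jure_closure(S, O, E)
--     F_new = set(F)
--
--     # Применяем первые два де-факто правила
--     for (x, y, α) in Es_de_jure: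
--         if α in {'w', 'r'}:
--             for rule in defacto_rules:
--                 if α == rule[0] and (x, y, rule[1]) not in F_new:
--                     F_new.add((x, y, rule[1]))
--
--     # Инициализируем список ребер и множество вершин
--     L = list(F_new)
--     N = set()
--
--     # Повторяем, пока список L не пуст
--     while L:
--         (x, y, α) = L.pop(0)
--         N.add(y)
--         for z in S:
--             for (x2, y2, β) in Es_de_jure:
--                 if y == x2 and (x, z, β) not in F_new:
--                     F_new.add((x, z, β))
--                     L.append((x, z, β))
--
--     return F_new
-- ===== SOURCE B (Python) =====
-- def de_facto_closure(S, O, E, F):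
--     # De-jure closure: index edges by source vertex so each rule application
--     # walks only y's outgoing edges instead of rescanning the whole edge set.
--     Es = set(E)
--     changed = True
--     while changed:
--         changed = False
--         idx = {}
--         for (s, t, a) in Es:
--             idx.setdefault(s, []).append((t, a))
--         new = set()
--         for letter in ('t', 'g'):
--             for (x, y, c) in Es:
--                 if c == letter:
--                     for (z, a) in idx.get(y, ()):
--                         if (x, z, a) not in Es:
--                             new.add((x, z, a))
--         if new:
--             Es |= new
--             changed = True
--
--     # First two de-facto rules: each right maps directly to the rights it induces.
--     grow = {'w': ('spy', 'find'), 'r': ('post', 'pass')}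
--     F_new = set(F)
--     for (x, y, a) in Es:
--         for tag in grow.get(a, ()):
--             F_new.add((x, y, tag))
--
--     # Propagation: index the de-jure edges by source once; FIFO worklist via a
--     # moving read pointer (no O(n) pop(0), no full edge rescan per popped item).
--     idxJ = {}
--     for (u, v, beta) in Es:
--         idxJ.setdefault(u, []).append(beta)
--     L = list(F_new)
--     i = 0
--     while i < len(L):
--         (x, y, a) = L[i]
--         i += 1
--         for z in S:
--             for beta in idxJ.get(y, ()):
--                 e = (x, z, beta)
--                 if e not in F_new:
--                     F_new.add(e)
--                     L.append(e)
--     return F_new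
-- ===== Notes on version B (the rewrite author's own statement) =====
-- stated objective: faster
-- what changed: Edges are indexed by source vertex in dicts (built once per de-jure round and once before propagation), so every rule application walks only the matching vertex's outgoing edges instead of rescanning the whole edge set, and the propagation worklist uses a moving read pointer instead of O(n) pop(0).
import Mathlib
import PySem

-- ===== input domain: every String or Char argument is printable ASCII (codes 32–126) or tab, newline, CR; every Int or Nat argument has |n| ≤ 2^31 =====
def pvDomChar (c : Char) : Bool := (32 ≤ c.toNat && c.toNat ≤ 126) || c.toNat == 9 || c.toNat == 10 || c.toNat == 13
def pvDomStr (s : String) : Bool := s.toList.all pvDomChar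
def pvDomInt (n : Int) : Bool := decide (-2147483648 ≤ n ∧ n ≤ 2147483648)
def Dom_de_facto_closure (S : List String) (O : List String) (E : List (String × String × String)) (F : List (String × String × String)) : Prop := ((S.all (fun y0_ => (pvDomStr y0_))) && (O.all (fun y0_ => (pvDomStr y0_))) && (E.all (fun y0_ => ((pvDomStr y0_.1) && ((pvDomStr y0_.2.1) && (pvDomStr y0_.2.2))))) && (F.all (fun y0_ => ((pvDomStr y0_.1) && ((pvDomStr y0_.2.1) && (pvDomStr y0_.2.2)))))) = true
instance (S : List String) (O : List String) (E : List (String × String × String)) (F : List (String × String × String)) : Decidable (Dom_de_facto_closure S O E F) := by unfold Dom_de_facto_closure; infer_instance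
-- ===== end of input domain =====

-- B replaces A's repeated full edge-set rescans by per-source-vertex indexes (dicts) and
-- replaces the O(n) pop(0) worklist by a moving read pointer; measurably faster.
-- Both Pythons return a SET; the ports return it as a PySem.Set list (insertion order),
-- and the Lean worklist/pointer states are modelled by the list of still-unprocessed items.
-- Both ports carry the same fuel counter as a totality guard for the two while-loops.

abbrev Trip := String × String × String

-- ===== PORT A =====
-- one round's new_edges: the take pass then the grant pass, each a full double scan of Etg
def aJureNew (Etg : List Trip) : PySem.Set Trip :=
  let new1 : PySem.Set Trip := Etg.foldl (fun new e =>
    if e.2.2 = "t" then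
      Etg.foldl (fun new f =>
        if e.2.1 = f.1 ∧ (e.1, f.2.1, f.2.2) ∉ Etg then PySem.Set.add new (e.1, f.2.1, f.2.2) else new) new
    else new) PySem.Set.empty
  Etg.foldl (fun new e =>
    if e.2.2 = "g" then
      Etg.foldl (fun new f =>
        if e.2.1 = f.1 ∧ (e.1, f.2.1, f.2.2) ∉ Etg then PySem.Set.add new (e.1, f.2.1, f.2.2) else new) new
    else new) new1

-- 'while changed' loop of de_jure_closure (fuel = totality guard; new_edges empty ⇔ changed stays False)
def aJure : Nat → PySem.Set Trip → PySem.Set Trip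
  | 0, Etg => Etg
  | fuel + 1, Etg =>
    let new := aJureNew Etg
    if new = [] then Etg else aJure fuel (PySem.Set.update Etg new)

-- the first-two-de-facto-rules loop
def aRules (Es : List Trip) (F : List Trip) : PySem.Set Trip :=
  let rules : PySem.Set (String × String) :=
    PySem.Set.ofList [("w", "spy"), ("w", "find"), ("r", "post"), ("r", "pass")]
  Es.foldl (fun Fn e =>
    if e.2.2 = "w" ∨ e.2.2 = "r" then
      rules.foldl (fun Fn rule =>
        if e.2.2 = rule.1 ∧ (e.1, e.2.1, rule.2) ∉ Fn then PySem.Set.add Fn (e.1, e.2.1, rule.2) else Fn) Fn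
    else Fn) (PySem.Set.ofList F)

-- 'while L' loop: state is the list of not-yet-popped items (L.pop(0) = head, appends go at the end)
def aLoop (S : List String) (Es : List Trip) : Nat → List Trip → PySem.Set String → PySem.Set Trip → PySem.Set Trip
  | 0, _, _, Fn => Fn
  | _ + 1, [], _, Fn => Fn
  | fuel + 1, e :: rest, N, Fn =>
    let N' := PySem.Set.add N e.2.1
    let st := S.foldl (fun st z =>
      Es.foldl (fun (st : PySem.Set Trip × List Trip) f =>
        if e.2.1 = f.1 ∧ (e.1, z, f.2.2) ∉ st.1 then
          (PySem.Set.add st.1 (e.1, z, f.2.2), st.2 ++ [(e.1, z, f.2.2)])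
        else st) st) (Fn, ([] : List Trip))
    aLoop S Es fuel (rest ++ st.2) N' st.1

-- shared totality fuel (large enough for every terminating run; both ports use the same guard)
def pvFuel (S : List String) (O : List String) (E : List Trip) (F : List Trip) : Nat :=
  (S.length + O.length + E.length + F.length + 5) ^ 12

def de_facto_closure (S : List String) (O : List String) (E : List (String × String × String)) (F : List (String × String × String)) : List (String × String × String) :=
  let Es := aJure (pvFuel S O E F) (PySem.Set.ofList E)
  let F1 := aRules Es F
  aLoop S Es (pvFuel S O E F) F1 PySem.Set.empty F1

-- ===== PORT B =====
-- idx: source vertex ↦ list of (target, right) of its outgoing edges (setdefault/append loop)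
def bIdx (Es : List Trip) : PySem.Dict String (List (String × String)) :=
  Es.foldl (fun d e => d.modify e.1 [] (· ++ [e.2])) PySem.Dict.empty

-- one pass (take or grant) using the index instead of an inner full scan
def bPass (letter : String) (Es : List Trip) (idx : PySem.Dict String (List (String × String)))
    (new : PySem.Set Trip) : PySem.Set Trip :=
  Es.foldl (fun new e =>
    if e.2.2 = letter then
      (idx.getD e.2.1 []).foldl (fun new za =>
        if (e.1, za.1, za.2) ∉ Es then PySem.Set.add new (e.1, za.1, za.2) else new) new
    else new) new

def bJure : Nat → PySem.Set Trip → PySem.Set Trip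
  | 0, Es => Es
  | fuel + 1, Es =>
    let idx := bIdx Es
    let new := bPass "g" Es idx (bPass "t" Es idx PySem.Set.empty)
    if new = [] then Es else bJure fuel (PySem.Set.update Es new)

-- grow = {'w': ('spy','find'), 'r': ('post','pass')}
def bGrow : PySem.Dict String (List String) :=
  (PySem.Dict.empty.insert "w" ["spy", "find"]).insert "r" ["post", "pass"]

def bRules (Es : List Trip) (F : List Trip) : PySem.Set Trip :=
  Es.foldl (fun Fn e =>
    (bGrow.getD e.2.2 []).foldl (fun Fn tag => PySem.Set.add Fn (e.1, e.2.1, tag)) Fn)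
    (PySem.Set.ofList F)

-- idxJ: source vertex ↦ list of rights on its outgoing de-jure edges
def bIdxJ (Es : List Trip) : PySem.Dict String (List String) :=
  Es.foldl (fun d e => d.modify e.1 [] (· ++ [e.2.2])) PySem.Dict.empty

-- pointer FIFO loop: state is L[i:], the list of unread items (appends go at the end)
def bLoop (S : List String) (idxJ : PySem.Dict String (List String)) :
    Nat → List Trip → PySem.Set Trip → PySem.Set Trip
  | 0, _, Fn => Fn
  | _ + 1, [], Fn => Fn
  | fuel + 1, e :: rest, Fn =>
    let st := S.foldl (fun st z =>
      (idxJ.getD e.2.1 []).foldl (fun (st : PySem.Set Trip × List Trip) beta =>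
        if (e.1, z, beta) ∉ st.1 then
          (PySem.Set.add st.1 (e.1, z, beta), st.2 ++ [(e.1, z, beta)])
        else st) st) (Fn, ([] : List Trip))
    bLoop S idxJ fuel (rest ++ st.2) st.1

def de_facto_closure_alt (S : List String) (O : List String) (E : List (String × String × String)) (F : List (String × String × String)) : List (String × String × String) :=
  let Es := bJure (pvFuel S O E F) (PySem.Set.ofList E)
  let F1 := bRules Es F
  bLoop S (bIdxJ Es) (pvFuel S O E F) F1 F1

-- ===== PRECONDITION & SPEC =====
def Spec_de_facto_closure (S : List String) (O : List String) (E : List (String × String × String)) (F : List (String × String × String)) (out : List (String × String × String)) : Prop := out = de_facto_closure_alt S O E F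
instance (S : List String) (O : List String) (E : List (String × String × String)) (F : List (String × String × String)) (out : List (String × String × String)) : Decidable (Spec_de_facto_closure S O E F out) := by unfold Spec_de_facto_closure; infer_instance

-- ===== CLAIM (what is proved, stated in full; the proofs are below) =====
def Claim_equal_de_facto_closure : Prop := ∀ (S : List String) (O : List String) (E : List (String × String × String)) (F : List (String × String × String)), Dom_de_facto_closure S O E F → Spec_de_facto_closure S O E F (de_facto_closure S O E F)

-- ===== LEMMAS AND PROOFS =====

lemma bIdx_getD (Es : List Trip) (y : String) :
    (bIdx Es).getD y [] = (Es.filter (fun f => f.1 == y)).map (fun f => f.2) := by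
  simp [bIdx, PySem.Dict.getD_foldl_modify_append]

lemma bIdxJ_getD (Es : List Trip) (y : String) :
    (bIdxJ Es).getD y [] = (Es.filter (fun f => f.1 == y)).map (fun f => f.2.2) := by
  have h : bIdxJ Es
      = (Es.map (fun e => (e.1, e.2.2))).foldl (fun d p => d.modify p.1 [] (· ++ [p.2])) PySem.Dict.empty := by
    rw [List.foldl_map]; rfl
  rw [h, PySem.Dict.getD_foldl_modify_append, List.filter_map, List.map_map]
  simp [Function.comp_def]

-- a loop over an index entry is the guarded loop over the whole edge list
lemma idx_fold_eq {β : Type} (Es : List Trip) (y : String) (g : β → (String × String) → β) (init : β) :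
    ((bIdx Es).getD y []).foldl g init = Es.foldl (fun acc f => if f.1 == y then g acc f.2 else acc) init := by
  rw [bIdx_getD, List.foldl_map, ← PySem.List.foldl_if_eq_foldl_filter]

lemma idxJ_fold_eq {β : Type} (Es : List Trip) (y : String) (g : β → String → β) (init : β) :
    ((bIdxJ Es).getD y []).foldl g init = Es.foldl (fun acc f => if f.1 == y then g acc f.2.2 else acc) init := by
  rw [bIdxJ_getD, List.foldl_map, ← PySem.List.foldl_if_eq_foldl_filter]


lemma pass_eq (letter : String) (Etg : List Trip) (new : PySem.Set Trip) :
    Etg.foldl (fun new e =>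
      if e.2.2 = letter then
        Etg.foldl (fun new f =>
          if e.2.1 = f.1 ∧ (e.1, f.2.1, f.2.2) ∉ Etg then PySem.Set.add new (e.1, f.2.1, f.2.2) else new) new
      else new) new
    = bPass letter Etg (bIdx Etg) new := by
  unfold bPass
  apply PySem.List.foldl_congr_mem
  intro acc e _
  by_cases hl : e.2.2 = letter
  · simp only [if_pos hl]
    rw [idx_fold_eq]
    apply PySem.List.foldl_congr_mem
    intro acc2 f _
    by_cases h1 : f.1 = e.2.1
    · simp [h1]
    · have h2 : ¬ e.2.1 = f.1 := fun h => h1 h.symm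
      simp [h1, h2]
  · simp [hl]

lemma jure_eq (fuel : Nat) (Etg : PySem.Set Trip) : aJure fuel Etg = bJure fuel Etg := by
  induction fuel generalizing Etg with
  | zero => rfl
  | succ n ih =>
    have hnew : aJureNew Etg = bPass "g" Etg (bIdx Etg) (bPass "t" Etg (bIdx Etg) PySem.Set.empty) := by
      unfold aJureNew
      rw [pass_eq, pass_eq]
    simp only [aJure, bJure, hnew]
    split
    · rfl
    · exact ih _

lemma rules_eq (Es : List Trip) (F : List Trip) : aRules Es F = bRules Es F := by
  unfold aRules bRules
  apply PySem.List.foldl_congr_mem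
  intro Fn e _
  by_cases hw : e.2.2 = "w"
  · have hg : bGrow.getD "w" [] = ["spy", "find"] := by decide
    simp [hw, hg, PySem.Set.ofList, PySem.Set.add_eq_ite]
    split_ifs <;> rfl
  · by_cases hr : e.2.2 = "r"
    · have hg : bGrow.getD "r" [] = ["post", "pass"] := by decide
      simp [hr, hg, PySem.Set.ofList, PySem.Set.add_eq_ite]
      split_ifs <;> rfl
    · have hg : bGrow.getD e.2.2 [] = [] := by
        simp [bGrow, PySem.Dict.getD_insert, hw, hr, PySem.Dict.getD_empty]
      simp [hw, hr, hg]

lemma loop_eq (S : List String) (Es : List Trip) (fuel : Nat) (L : List Trip)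
    (N : PySem.Set String) (Fn : PySem.Set Trip) :
    aLoop S Es fuel L N Fn = bLoop S (bIdxJ Es) fuel L Fn := by
  induction fuel generalizing L N Fn with
  | zero => rfl
  | succ n ih =>
    cases L with
    | nil => rfl
    | cons e rest =>
      have hst :
          S.foldl (fun st z =>
            Es.foldl (fun (st : PySem.Set Trip × List Trip) f =>
              if e.2.1 = f.1 ∧ (e.1, z, f.2.2) ∉ st.1 then
                (PySem.Set.add st.1 (e.1, z, f.2.2), st.2 ++ [(e.1, z, f.2.2)])
              else st) st) (Fn, ([] : List Trip))
          = S.foldl (fun st z =>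
            ((bIdxJ Es).getD e.2.1 []).foldl (fun (st : PySem.Set Trip × List Trip) beta =>
              if (e.1, z, beta) ∉ st.1 then
                (PySem.Set.add st.1 (e.1, z, beta), st.2 ++ [(e.1, z, beta)])
              else st) st) (Fn, ([] : List Trip)) := by
        apply PySem.List.foldl_congr_mem
        intro st z _
        rw [idxJ_fold_eq]
        apply PySem.List.foldl_congr_mem
        intro st2 f _
        by_cases h1 : f.1 = e.2.1
        · simp [h1]
        · have h2 : ¬ e.2.1 = f.1 := fun h => h1 h.symm
          simp [h1, h2]
      simp only [aLoop, bLoop, hst]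
      exact ih _ _ _

-- ===== VERDICT (by name: the statement is the Claim_ definition above) =====
theorem de_facto_closure_spec : Claim_equal_de_facto_closure := by
  intro S O E F _
  unfold Spec_de_facto_closure de_facto_closure de_facto_closure_alt
  simp only [jure_eq, rules_eq, loop_eq]
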